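-- pv_equiv track=rewrite | github.com/Ayush-Aditya-444/Python_Public | Move all the negative elements to one side of the array (Coding Question).py | ayush1
-- ===== SOURCE A (Python) =====
-- def ayush1(list1):
--     list2=[]
--     i=0
--     while i!=len(list1)-1:
--         if list1[i]<0:
--             list2.append(list1[i])
--             list1.pop(i)
--         else:
--             i+=1
--     list2=list2+list1
--     return list2
-- ===== SOURCE B (Python) =====
-- def ayush1(list1):
--     # One-pass partition of list1[:-1] (A never examines the last element);
--     # note: A mutates list1 in place, B does not — equivalence is about the return value.
--     last = list1[-1]
--     init = list1[:-1]
--     neg = [x for x in init if x < 0]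
--     nonneg = [x for x in init if x >= 0]
--     return neg + nonneg + [last]
-- ===== Notes on version B (the rewrite author's own statement) =====
-- stated objective: faster
-- what changed: Replaced the quadratic while-loop that repeatedly pops negatives out of the mutated list with a single linear partition of list1[:-1] (negatives, then non-negatives, then the untouched last element); B does not mutate list1.
import Mathlib
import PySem

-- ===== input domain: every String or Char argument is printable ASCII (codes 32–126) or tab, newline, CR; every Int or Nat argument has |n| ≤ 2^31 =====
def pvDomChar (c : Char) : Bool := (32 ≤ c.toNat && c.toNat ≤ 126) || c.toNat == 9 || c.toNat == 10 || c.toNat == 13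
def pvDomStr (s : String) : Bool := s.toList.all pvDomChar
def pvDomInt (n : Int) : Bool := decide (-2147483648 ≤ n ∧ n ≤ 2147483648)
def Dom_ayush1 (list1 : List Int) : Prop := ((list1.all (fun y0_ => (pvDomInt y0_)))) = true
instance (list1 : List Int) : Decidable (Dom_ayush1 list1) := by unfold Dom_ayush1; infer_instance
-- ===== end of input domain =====

-- B replaces A's quadratic pop-in-place while-loop by one linear partition of list1[:-1]
-- (objective: faster); A mutates list1 in place, B does not — the claim is about the return value.

-- ===== PORT A =====
-- the while loop: state is (list1, list2, i); pop(i) at a valid index is eraseIdx i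
def ayush1Loop (list1 list2 : List Int) (i : Nat) : List Int :=
  if (i : Int) = (list1.length : Int) - 1 then list2 ++ list1
  else
    match h : PySem.List.pyGet? list1 (i : Int) with
    | none => list2 ++ list1   -- IndexError (empty input); outside Pre_
    | some x =>
      if x < 0 then ayush1Loop (list1.eraseIdx i) (list2 ++ [x]) i
      else ayush1Loop list1 list2 (i + 1)
termination_by list1.length - i
decreasing_by
  · have hi : i < list1.length := by
      by_contra hc
      have hn : PySem.List.pyGet? list1 (i : Int) = none := by
        rw [PySem.List.pyGet?_eq_none_iff]
        unfold PySem.Raise.InRange; omega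
      simp [h] at hn
    simp [List.length_eraseIdx, hi]
    omega
  · have hi : i < list1.length := by
      by_contra hc
      have hn : PySem.List.pyGet? list1 (i : Int) = none := by
        rw [PySem.List.pyGet?_eq_none_iff]
        unfold PySem.Raise.InRange; omega
      simp [h] at hn
    omega

def ayush1 (list1 : List Int) : List Int :=
  ayush1Loop list1 [] 0

-- ===== PORT B =====
def ayush1_alt (list1 : List Int) : List Int :=
  match PySem.List.pyGet? list1 (-1) with
  | none => []   -- IndexError on empty input; outside Pre_
  | some last =>
    let init := PySem.List.slice list1 none (some (-1))
    (init.filter (fun x => x < 0)) ++ (init.filter (fun x => x ≥ 0)) ++ [last]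

-- ===== PRECONDITION & SPEC =====
-- A raises IndexError on the empty list (len-1 = -1 ≠ 0, then list1[0]); B raises there too.
def Pre_ayush1 (list1 : List Int) : Prop := list1 ≠ []
instance (list1 : List Int) : Decidable (Pre_ayush1 list1) := by unfold Pre_ayush1; infer_instance
def pvWitness_ayush1 : List Int := ([-3, 1, -2, 0])

def Spec_ayush1 (list1 : List Int) (out : List Int) : Prop := out = ayush1_alt list1
instance (list1 : List Int) (out : List Int) : Decidable (Spec_ayush1 list1 out) := by unfold Spec_ayush1; infer_instance

-- ===== CLAIM (what is proved, stated in full; the proofs are below) =====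
def Claim_equal_ayush1 : Prop := ∀ (list1 : List Int), Dom_ayush1 list1 → Pre_ayush1 list1 → Spec_ayush1 list1 (ayush1 list1)

-- ===== LEMMAS AND PROOFS =====

-- loop invariant: with the list split as pre ++ mid ++ [last] and i = pre.length,
-- the loop moves mid's negatives to list2 (in order), keeps its non-negatives in place,
-- and never touches last.
theorem ayush1Loop_inv (mid : List Int) : ∀ (pre list2 : List Int) (last : Int),
    ayush1Loop (pre ++ mid ++ [last]) list2 pre.length =
      list2 ++ mid.filter (fun x => x < 0) ++ pre ++ mid.filter (fun x => ¬ x < 0) ++ [last] := by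
  induction mid with
  | nil =>
    intro pre list2 last
    rw [ayush1Loop]
    simp
  | cons x rest ih =>
    intro pre list2 last
    rw [ayush1Loop]
    have hlen : ((pre.length : Int)) ≠ ((pre ++ x :: rest ++ [last]).length : Int) - 1 := by
      simp; omega
    rw [if_neg hlen]
    have hget : PySem.List.pyGet? (pre ++ x :: rest ++ [last]) (pre.length : Int) = some x := by
      rw [show pre ++ x :: rest ++ [last] = pre ++ (x :: (rest ++ [last])) by simp]
      exact PySem.List.pyGet?_append_length pre (rest ++ [last]) x
    rw [hget]
    split
    · simp_all
    rename_i y hy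
    injection hy with hxy
    subst hxy
    by_cases hx : x < 0
    · rw [if_pos hx]
      have herase : (pre ++ x :: rest ++ [last]).eraseIdx pre.length = pre ++ rest ++ [last] := by
        rw [show pre ++ x :: rest ++ [last] = pre ++ (x :: (rest ++ [last])) by simp,
            List.eraseIdx_append_of_length_le (by omega)]
        simp
      rw [herase, ih pre (list2 ++ [x]) last]
      simp [hx]
    · rw [if_neg hx]
      have hcast : pre.length + 1 = (pre ++ [x]).length := by simp
      have hlist : pre ++ x :: rest ++ [last] = (pre ++ [x]) ++ rest ++ [last] := by simp
      rw [hcast, hlist, ih (pre ++ [x]) list2 last]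
      simp [hx, Int.not_lt.mp hx]

-- ===== VERDICT (by name: the statement is the Claim_ definition above) =====
theorem ayush1_spec : Claim_equal_ayush1 := by
  intro list1 _ hpre
  unfold Spec_ayush1 ayush1 ayush1_alt
  have hne : list1 ≠ [] := hpre
  obtain ⟨mid, last, hsplit⟩ : ∃ mid last, list1 = mid ++ [last] := by
    rcases List.eq_nil_or_concat list1 with h | ⟨mid, last, h⟩
    · exact absurd h hne
    · exact ⟨mid, last, by simpa [List.concat_eq_append] using h⟩
  subst hsplit
  rw [PySem.List.pyGet?_neg_one_append_singleton]
  have hslice : PySem.List.slice (mid ++ [last]) none (some (-1)) = mid := by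
    rw [PySem.List.slice_to_neg_one]; simp
  have := ayush1Loop_inv mid [] [] last
  simp only [List.nil_append, List.append_nil, List.length_nil] at this
  rw [show mid ++ [last] = [] ++ mid ++ [last] by simp] at this ⊢
  rw [show (0 : Nat) = ([] : List Int).length by simp] at this ⊢
  rw [ayush1Loop_inv mid [] [] last]
  simp only [List.nil_append, List.append_nil, hslice]
  have hf : List.filter (fun x => decide ¬ x < 0) mid = List.filter (fun x => decide (x ≥ 0)) mid := by
    apply List.filter_congr; intro a _; simp [ge_iff_le]
  rw [hf]
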